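-- pv_equiv track=rewrite | github.com/Hooneybadger/jump-rope-detector | fsm/basic_jump/jump_rope_pipeline.py | _split_events_by_gap
-- ===== SOURCE A (Python) =====
-- def _split_events_by_gap(events, gap_ms):
--     if not events:
--         return []
--     split_gap_ms = max(0, int(gap_ms))
--     segments = []
--     current_segment = [events[0]]
--     for event in events[1:]:
--         prev_ts = int(current_segment[-1].get("timestamp_ms", -1))
--         curr_ts = int(event.get("timestamp_ms", -1))
--         if (
--             split_gap_ms > 0
--             and prev_ts >= 0
--             and curr_ts >= 0
--             and (curr_ts - prev_ts) > split_gap_ms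
--         ):
--             segments.append(current_segment)
--             current_segment = [event]
--         else:
--             current_segment.append(event)
--     if current_segment:
--         segments.append(current_segment)
--     return segments
-- ===== SOURCE B (Python) =====
-- def _split_events_by_gap(events, gap_ms):
--     # staged decomposition: repeatedly find the first gap break in the remaining
--     # suffix, cut that prefix off as a whole slice, and continue on the rest
--     g = max(0, int(gap_ms))
--     out = []
--     rest = events
--     while rest:
--         i = 1
--         for prev, curr in zip(rest, rest[1:]):
--             pt = int(prev.get("timestamp_ms", -1))
--             ct = int(curr.get("timestamp_ms", -1))
--             if g > 0 and pt >= 0 and ct >= 0 and ct - pt > g: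
--                 break
--             i += 1
--         out.append(rest[:i])
--         rest = rest[i:]
--     return out
-- ===== Notes on version B (the rewrite author's own statement) =====
-- stated objective: alternative
-- what changed: B replaces A's single pass with a running current-segment accumulator and final flush by a staged find-first-break-and-slice loop: it scans the remaining suffix for the first gap break, cuts that prefix off as one slice, and repeats on the rest.
import Mathlib
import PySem

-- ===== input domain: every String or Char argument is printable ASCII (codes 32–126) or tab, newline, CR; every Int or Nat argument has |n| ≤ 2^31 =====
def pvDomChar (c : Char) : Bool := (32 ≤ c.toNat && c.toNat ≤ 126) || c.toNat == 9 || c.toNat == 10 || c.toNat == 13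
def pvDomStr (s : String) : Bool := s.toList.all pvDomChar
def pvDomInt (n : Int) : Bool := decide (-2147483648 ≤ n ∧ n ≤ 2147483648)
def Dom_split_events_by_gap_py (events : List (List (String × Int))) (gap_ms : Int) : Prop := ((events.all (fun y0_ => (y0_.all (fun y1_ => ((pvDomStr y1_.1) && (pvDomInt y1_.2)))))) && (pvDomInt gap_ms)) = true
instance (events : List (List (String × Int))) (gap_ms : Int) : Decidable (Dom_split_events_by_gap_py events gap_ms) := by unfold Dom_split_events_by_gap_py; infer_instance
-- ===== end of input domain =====

-- B replaces A's single pass with a running current-segment accumulator by a staged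
-- find-first-break-and-slice loop: cut the first maximal segment off as a slice, repeat
-- on the remaining suffix (objective: alternative).

-- shared helper: e.get("timestamp_ms", -1) on an association-list dict (first match)
def pvTs (e : List (String × Int)) : Int :=
  (PySem.Dict.mk e).getD "timestamp_ms" (-1)

-- shared helper: the gap condition (identical boolean expression in both Pythons)
def pvGapCond (g prev_ts curr_ts : Int) : Bool :=
  decide (0 < g) && decide (0 ≤ prev_ts) && decide (0 ≤ curr_ts) && decide (g < curr_ts - prev_ts)

-- ===== PORT A =====
def pvStepA (g : Int) (st : List (List (List (String × Int))) × List (List (String × Int)))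
    (event : List (String × Int)) :
    List (List (List (String × Int))) × List (List (String × Int)) :=
  let segments := st.1
  let cur := st.2
  let prev_ts := pvTs ((PySem.List.pyGet? cur (-1)).getD [])   -- current_segment[-1] (cur is never empty)
  let curr_ts := pvTs event
  if pvGapCond g prev_ts curr_ts then (segments ++ [cur], [event])
  else (segments, cur ++ [event])

def split_events_by_gap_py (events : List (List (String × Int))) (gap_ms : Int) :
    List (List (List (String × Int))) :=
  match events with
  | [] => []
  | e0 :: rest =>
    let g := max 0 gap_ms
    let st := rest.foldl (pvStepA g) ([], [e0])
    if st.2.isEmpty then st.1 else st.1 ++ [st.2]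

-- ===== PORT B =====
-- the 'for prev, curr in zip(rest, rest[1:]) … break' counter: number of leading
-- adjacent pairs with no gap break (Python's final i is this count + 1)
def pvLead (g : Int) : List (List (String × Int)) → Nat
  | x :: y :: r => if pvGapCond g (pvTs x) (pvTs y) then 0 else pvLead g (y :: r) + 1
  | _ => 0

-- slice bridge lemma in the exact cast form pvLoopB produces (cited by its decreasing_by)
theorem pvSliceFrom {α : Type} (xs : List α) (k : Nat) :
    PySem.List.slice xs (some ((k : Int) + 1)) = xs.drop (k + 1) := by
  have h : ((k : Int) + 1) = (((k + 1 : Nat) : Int)) := by push_cast; ring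
  rw [h, PySem.List.slice_from_natCast]

-- the 'while rest:' loop: append rest[:i], continue with rest[i:]
def pvLoopB (g : Int) (out : List (List (List (String × Int))))
    (rest : List (List (String × Int))) : List (List (List (String × Int))) :=
  match rest with
  | [] => out
  | e :: r =>
    let i : Int := (pvLead g (e :: r) : Int) + 1
    pvLoopB g (out ++ [PySem.List.slice (e :: r) none (some i)])
      (PySem.List.slice (e :: r) (some i) none)
termination_by rest.length
decreasing_by
  simp only [pvSliceFrom, List.length_drop, List.length_cons]
  omega

def split_events_by_gap_py_alt (events : List (List (String × Int))) (gap_ms : Int) :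
    List (List (List (String × Int))) :=
  let g := max 0 gap_ms
  pvLoopB g [] events

-- ===== PRECONDITION & SPEC =====
def Spec_split_events_by_gap_py (events : List (List (String × Int))) (gap_ms : Int) (out : List (List (List (String × Int)))) : Prop := out = split_events_by_gap_py_alt events gap_ms
instance (events : List (List (String × Int))) (gap_ms : Int) (out : List (List (List (String × Int)))) : Decidable (Spec_split_events_by_gap_py events gap_ms out) := by unfold Spec_split_events_by_gap_py; infer_instance

-- ===== CLAIM (what is proved, stated in full; the proofs are below) =====
def Claim_equal_split_events_by_gap_py : Prop := ∀ (events : List (List (String × Int))) (gap_ms : Int), Dom_split_events_by_gap_py events gap_ms → Spec_split_events_by_gap_py events gap_ms (split_events_by_gap_py events gap_ms)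

-- ===== LEMMAS AND PROOFS =====

theorem pvSliceTo {α : Type} (xs : List α) (k : Nat) :
    PySem.List.slice xs none (some ((k : Int) + 1)) = xs.take (k + 1) := by
  have h : ((k : Int) + 1) = (((k + 1 : Nat) : Int)) := by push_cast; ring
  rw [h, PySem.List.slice_to_natCast]

-- reference splitter: pvSp g x rest = (rest of x's segment, the later segments)
def pvSp (g : Int) (x : List (String × Int)) :
    List (List (String × Int)) →
    List (List (String × Int)) × List (List (List (String × Int)))
  | [] => ([], [])
  | y :: r =>
    let p := pvSp g y r
    if pvGapCond g (pvTs x) (pvTs y) then ([], (y :: p.1) :: p.2)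
    else (y :: p.1, p.2)

theorem pvA_loop (g : Int) (rest : List (List (String × Int))) :
    ∀ (segs : List (List (List (String × Int)))) (cur : List (List (String × Int)))
      (x : List (String × Int)), cur.getLast? = some x →
    (rest.foldl (pvStepA g) (segs, cur)).2 ≠ [] ∧
    (rest.foldl (pvStepA g) (segs, cur)).1 ++ [(rest.foldl (pvStepA g) (segs, cur)).2]
      = segs ++ ((cur ++ (pvSp g x rest).1) :: (pvSp g x rest).2) := by
  induction rest with
  | nil =>
    intro segs cur x h
    have hne : cur ≠ [] := by intro hc; simp [hc] at h
    simp [pvSp, hne]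
  | cons y r ih =>
    intro segs cur x h
    have hget : PySem.List.pyGet? cur (-1) = some x := by
      rw [PySem.List.pyGet?_neg_one, h]
    by_cases hb : pvGapCond g (pvTs x) (pvTs y) = true
    · have := ih (segs ++ [cur]) [y] y (by simp)
      simp only [List.foldl_cons, pvStepA, hget, Option.getD_some, hb, if_pos]
      refine ⟨this.1, ?_⟩
      rw [this.2]
      simp [pvSp, hb]
    · have := ih segs (cur ++ [y]) y (by simp)
      simp only [List.foldl_cons, pvStepA, hget, Option.getD_some, hb, if_neg, Bool.false_eq_true,
        not_false_iff]
      refine ⟨this.1, ?_⟩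
      rw [this.2]
      simp [pvSp, hb]

-- the accumulator of pvLoopB is just prepended to the result
theorem pvLoopB_acc (g : Int) : ∀ (n : Nat) (rest : List (List (String × Int))),
    rest.length ≤ n → ∀ out, pvLoopB g out rest = out ++ pvLoopB g [] rest := by
  intro n
  induction n with
  | zero =>
    intro rest hn out
    have : rest = [] := by cases rest <;> simp_all
    subst this
    rw [pvLoopB, pvLoopB]
    simp
  | succ n ih =>
    intro rest hn out
    match rest with
    | [] => rw [pvLoopB, pvLoopB]; simp
    | e :: r =>
      rw [pvLoopB]
      conv_rhs => rw [pvLoopB]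
      have ht : (PySem.List.slice (e :: r)
          (some ((pvLead g (e :: r) : Int) + 1))).length ≤ n := by
        rw [pvSliceFrom]
        simp only [List.length_drop, List.length_cons] at hn ⊢
        omega
      rw [ih _ ht]
      conv_rhs => rw [ih _ ht]
      simp

-- one unfolding of pvLoopB on a nonempty list, stated with take/drop
theorem pvLoopB_cons (g : Int) (e : List (String × Int)) (r : List (List (String × Int))) :
    pvLoopB g [] (e :: r)
      = (e :: r).take (pvLead g (e :: r) + 1)
        :: pvLoopB g [] ((e :: r).drop (pvLead g (e :: r) + 1)) := by
  rw [pvLoopB]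
  rw [pvSliceTo, pvSliceFrom]
  rw [pvLoopB_acc g ((e :: r).drop (pvLead g (e :: r) + 1)).length _ le_rfl]
  simp

-- pvLoopB with empty accumulator computes the pvSp segmentation
theorem pvB_loop (g : Int) : ∀ (n : Nat) (rest : List (List (String × Int)))
    (x : List (String × Int)), rest.length ≤ n →
    pvLoopB g [] (x :: rest) = (x :: (pvSp g x rest).1) :: (pvSp g x rest).2 := by
  intro n
  induction n with
  | zero =>
    intro rest x hn
    have : rest = [] := by cases rest <;> simp_all
    subst this
    rw [pvLoopB_cons]
    simp only [pvLead, List.take_succ_cons, List.take_zero, List.drop_succ_cons, List.drop_zero]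
    rw [pvLoopB]
    simp [pvSp]
  | succ n ih =>
    intro rest x hn
    match rest with
    | [] =>
      rw [pvLoopB_cons]
      simp only [pvLead, List.take_succ_cons, List.take_zero, List.drop_succ_cons, List.drop_zero]
      rw [pvLoopB]
      simp [pvSp]
    | y :: r =>
      have hrn : r.length ≤ n := by simp only [List.length_cons] at hn; omega
      by_cases hb : pvGapCond g (pvTs x) (pvTs y) = true
      · have hl : pvLead g (x :: y :: r) = 0 := by simp [pvLead, hb]
        rw [pvLoopB_cons, hl]
        simp only [List.take_succ_cons, List.take_zero, List.drop_succ_cons, List.drop_zero]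
        rw [ih r y hrn]
        simp [pvSp, hb]
      · have hl : pvLead g (x :: y :: r) = pvLead g (y :: r) + 1 := by
          simp [pvLead, hb]
        have hyr := (pvLoopB_cons g y r).symm.trans (ih r y hrn)
        injection hyr with h1 h2
        rw [pvLoopB_cons, hl, List.take_succ_cons, List.drop_succ_cons, h1, h2]
        simp [pvSp, hb]

-- ===== VERDICT (by name: the statement is the Claim_ definition above) =====
theorem split_events_by_gap_py_spec : Claim_equal_split_events_by_gap_py := by
  intro events gap_ms _
  unfold Spec_split_events_by_gap_py split_events_by_gap_py split_events_by_gap_py_alt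
  cases events with
  | nil => rw [pvLoopB]
  | cons e0 rest =>
    have hA := pvA_loop (max 0 gap_ms) rest [] [e0] e0 (by simp)
    have hB := pvB_loop (max 0 gap_ms) rest.length rest e0 le_rfl
    simp only []
    rw [hB, if_neg (by simpa using hA.1)]
    have := hA.2
    simpa using this
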